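-- pv_equiv track=rewrite | github.com/Infrar3dd/CTF-Tasks | Crypto/www/www.py | wiener_attack
-- ===== SOURCE A (Python) =====
-- import math
--
-- def wiener_attack(e, n):
--     def continued_fractions(n, d):
--         cf = []
--         while d:
--             q, r = divmod(n, d)
--             cf.append(q)
--             n, d = d, r
--         return cf
--
--     def convergents(cf):
--         num, den = [], []
--         for i in range(len(cf)):
--             if i == 0:
--                 num.append(cf[0])
--                 den.append(1)
--             elif i == 1:
--                 num.append(cf[0]*cf[1] + 1)
--                 den.append(cf[1])
--             else:
--                 num.append(cf[i]*num[i-1] + num[i-2])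
--                 den.append(cf[i]*den[i-1] + den[i-2])
--             yield (num[i], den[i])
--
--     cf = continued_fractions(e, n)
--     convergents_list = list(convergents(cf))
--
--     for k, d in convergents_list:
--         if k == 0:
--             continue
--
--         phi = (e * d - 1) // k
--
--         b = n - phi + 1
--         discriminant = b * b - 4 * n
--
--         if discriminant >= 0:
--             root = math.isqrt(discriminant)
--             if root * root == discriminant:
--                 p = (b + root) // 2
--                 q = (b - root) // 2
--                 if p * q == n:
--                     return d, p, q
--     return None, None, None
-- ===== SOURCE B (Python) =====
-- import math
--
-- def wiener_attack(e, n):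
--     # Different algorithm for the convergents: instead of the forward three-term
--     # DP recurrence num[i] = cf[i]*num[i-1] + num[i-2], each candidate convergent
--     # is computed INDEPENDENTLY by evaluating its quotient prefix right-to-left
--     # as a nested fraction q0 + 1/(q1 + 1/(...)): the running pair (p, s) is the
--     # continuant of the current suffix, and (p, s) ends as (numerator,
--     # denominator) of the i-th convergent exactly.  No state is carried from one
--     # candidate to the next.
--     qs = []
--     a, b = e, n
--     while b:
--         qs.append(a // b)
--         a, b = b, a % b
--     for i in range(len(qs)):
--         p, s = qs[i], 1
--         for j in range(i - 1, -1, -1):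
--             p, s = qs[j] * p + s, p
--         if p == 0:
--             continue
--         phi = (e * s - 1) // p
--         t = n - phi + 1
--         disc = t * t - 4 * n
--         if disc >= 0:
--             root = math.isqrt(disc)
--             if root * root == disc:
--                 x = (t + root) // 2
--                 y = (t - root) // 2
--                 if x * y == n:
--                     return s, x, y
--     return None, None, None
-- ===== Notes on version B (the rewrite author's own statement) =====
-- stated objective: alternative
-- what changed: Drops A's forward three-term dynamic-programming recurrence (num/den lists, special i=0/i=1 cases, generator plus scan): B builds only the quotient list and evaluates each candidate convergent independently by folding its quotient prefix right-to-left as a nested fraction, carrying no state between candidates (O(L^2) continuant evaluation vs A's O(L) DP, L = continued-fraction length, at most ~47 here).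
import Mathlib
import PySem

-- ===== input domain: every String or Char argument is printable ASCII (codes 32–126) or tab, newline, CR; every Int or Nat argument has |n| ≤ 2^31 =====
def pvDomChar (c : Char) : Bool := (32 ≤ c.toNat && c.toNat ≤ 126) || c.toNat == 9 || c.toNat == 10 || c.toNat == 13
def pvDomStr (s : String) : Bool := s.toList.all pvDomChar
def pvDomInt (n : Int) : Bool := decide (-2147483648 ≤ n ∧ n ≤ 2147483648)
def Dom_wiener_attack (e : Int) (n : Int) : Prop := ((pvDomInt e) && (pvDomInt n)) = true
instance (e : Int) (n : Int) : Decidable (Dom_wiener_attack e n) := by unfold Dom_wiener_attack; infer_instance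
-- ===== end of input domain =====

-- B replaces A's forward three-term DP recurrence over num/den lists by evaluating each
-- quotient prefix independently right-to-left as a nested fraction (no carried state
-- between candidates); objective: alternative.

-- Python's `a % b` shrinks in absolute value: termination measure for the cf loops.
theorem pvModNatAbsLt (a b : Int) (hb : b ≠ 0) :
    (PySem.Int.mod a b).natAbs < b.natAbs := by
  rcases lt_or_gt_of_ne hb with h | h
  · have := PySem.Int.mod_neg_bounds a h
    omega
  · have h1 := PySem.Int.mod_nonneg a h
    have h2 := PySem.Int.mod_lt a h
    omega

-- ===== PORT A =====
-- helper continued_fractions: while d: q,r = divmod(n,d); cf.append(q); n,d = d,r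
def pvCfA (n d : Int) : List Int :=
  if _hd : d = 0 then []
  else PySem.Int.floordiv n d :: pvCfA d (PySem.Int.mod n d)
termination_by d.natAbs
decreasing_by exact pvModNatAbsLt n d _hd

-- helper convergents: generator with i = 0, i = 1 base cases, then
-- num[i] = cf[i]*num[i-1] + num[i-2] (ditto den); the recursion carries the
-- last two numerators/denominators in place of the num/den lists.
def pvConvGo (rest : List Int) (n2 n1 d2 d1 : Int) : List (Int × Int) :=
  match rest with
  | [] => []
  | c :: cs => (c * n1 + n2, c * d1 + d2) :: pvConvGo cs n1 (c * n1 + n2) d1 (c * d1 + d2)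

def pvConvergentsA (cf : List Int) : List (Int × Int) :=
  match cf with
  | [] => []
  | [c0] => [(c0, 1)]
  | c0 :: c1 :: cs =>
      (c0, 1) :: (c0 * c1 + 1, c1) :: pvConvGo cs c0 (c0 * c1 + 1) 1 c1

-- the final `for k, d in convergents_list:` loop.
-- math.isqrt(x) for x ≥ 0 is the floor square root = Nat.sqrt (exact on the
-- guarded branch disc ≥ 0; PySem has no isqrt primitive).
def pvScanA (e n : Int) : List (Int × Int) → Option Int × Option Int × Option Int
  | [] => (none, none, none)
  | (k, d) :: rest =>
      if k = 0 then pvScanA e n rest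
      else
        let phi := PySem.Int.floordiv (e * d - 1) k
        let b := n - phi + 1
        let disc := b * b - 4 * n
        if disc ≥ 0 then
          let root : Int := (Nat.sqrt disc.toNat : Int)
          if root * root = disc then
            let p := PySem.Int.floordiv (b + root) 2
            let q := PySem.Int.floordiv (b - root) 2
            if p * q = n then (some d, some p, some q) else pvScanA e n rest
          else pvScanA e n rest
        else pvScanA e n rest

def wiener_attack (e : Int) (n : Int) : Option Int × Option Int × Option Int :=
  pvScanA e n (pvConvergentsA (pvCfA e n))

-- ===== PORT B =====
-- while b: qs.append(a // b); a, b = b, a % b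
def pvQsB (a b : Int) : List Int :=
  if _hb : b = 0 then []
  else PySem.Int.floordiv a b :: pvQsB b (PySem.Int.mod a b)
termination_by b.natAbs
decreasing_by exact pvModNatAbsLt a b _hb

-- inner loop: p, s = qs[i], 1; for j in range(i-1, -1, -1): p, s = qs[j]*p + s, p
-- (the descending loop over qs[0..i-1] is the right fold over `qs.take i`)
def pvNest (init : Int × Int) (pre : List Int) : Int × Int :=
  pre.foldr (fun qj ps => (qj * ps.1 + ps.2, ps.1)) init

-- outer loop: for i in range(len(qs)): evaluate prefix, test candidate, else next i
def pvLoopB (e n : Int) (qs : List Int) (i : Nat) : Option Int × Option Int × Option Int :=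
  if h : i < qs.length then
    let ps := pvNest (qs[i], 1) (qs.take i)
    let p := ps.1
    let s := ps.2
    if p = 0 then pvLoopB e n qs (i + 1)
    else
      let phi := PySem.Int.floordiv (e * s - 1) p
      let t := n - phi + 1
      let disc := t * t - 4 * n
      if disc ≥ 0 then
        let root : Int := (Nat.sqrt disc.toNat : Int)
        if root * root = disc then
          let x := PySem.Int.floordiv (t + root) 2
          let y := PySem.Int.floordiv (t - root) 2
          if x * y = n then (some s, some x, some y) else pvLoopB e n qs (i + 1)
        else pvLoopB e n qs (i + 1)
      else pvLoopB e n qs (i + 1)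
  else (none, none, none)
termination_by qs.length - i

def wiener_attack_alt (e : Int) (n : Int) : Option Int × Option Int × Option Int :=
  pvLoopB e n (pvQsB e n) 0

-- ===== PRECONDITION & SPEC =====
def Spec_wiener_attack (e : Int) (n : Int) (out : Option Int × Option Int × Option Int) : Prop := out = wiener_attack_alt e n
instance (e : Int) (n : Int) (out : Option Int × Option Int × Option Int) : Decidable (Spec_wiener_attack e n out) := by unfold Spec_wiener_attack; infer_instance

-- ===== CLAIM (what is proved, stated in full; the proofs are below) =====
def Claim_equal_wiener_attack : Prop := ∀ (e : Int) (n : Int), Dom_wiener_attack e n → Spec_wiener_attack e n (wiener_attack e n)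

-- ===== LEMMAS AND PROOFS =====

-- both quotient builders are the same Euclidean loop
theorem pvQsB_eq_cfA (a b : Int) : pvQsB a b = pvCfA a b := by
  by_cases hb : b = 0
  · rw [pvQsB, pvCfA]; simp [hb]
  · rw [pvQsB, pvCfA]
    simp only [hb, dite_false]
    exact congrArg _ (pvQsB_eq_cfA b (PySem.Int.mod a b))
termination_by b.natAbs
decreasing_by exact pvModNatAbsLt a b hb

-- uniform convergent recurrence seeded with (0,1),(1,0)
def pvConvU (cf : List Int) (h2 h1 k2 k1 : Int) : List (Int × Int) :=
  match cf with
  | [] => []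
  | q :: cs => (q * h1 + h2, q * k1 + k2) :: pvConvU cs h1 (q * h1 + h2) k1 (q * k1 + k2)

theorem pvConvGo_eq_convU (cs : List Int) (n2 n1 d2 d1 : Int) :
    pvConvGo cs n2 n1 d2 d1 = pvConvU cs n2 n1 d2 d1 := by
  induction cs generalizing n2 n1 d2 d1 with
  | nil => rfl
  | cons c cs ih => simp [pvConvGo, pvConvU, ih]

-- A's explicit i = 0 / i = 1 base cases are exactly the uniform recurrence's
-- first two steps from the standard seed.
theorem pvConvergentsA_eq_convU (cf : List Int) :
    pvConvergentsA cf = pvConvU cf 0 1 1 0 := by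
  match cf with
  | [] => rfl
  | [c0] => simp [pvConvergentsA, pvConvU]
  | c0 :: c1 :: cs =>
      simp [pvConvergentsA, pvConvU, pvConvGo_eq_convU]
      ring_nf
      exact ⟨trivial, trivial⟩

-- the right fold's step is linear in its state, so pvNest with an arbitrary
-- seed is a combination of the two basis runs pvNest (1,0) and pvNest (0,1)
theorem pvNest_linear (l : List Int) (p s : Int) :
    pvNest (p, s) l =
      (p * (pvNest (1, 0) l).1 + s * (pvNest (0, 1) l).1,
       p * (pvNest (1, 0) l).2 + s * (pvNest (0, 1) l).2) := by
  induction l with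
  | nil => simp [pvNest]
  | cons q l ih =>
      simp only [pvNest, List.foldr_cons] at *
      rw [ih]
      simp at *
      ring

-- appending one quotient at the end updates the two basis runs exactly like the
-- forward recurrence's state shift
theorem pvNest_append (l : List Int) (x : Int) :
    pvNest (1, 0) (l ++ [x]) = pvNest (x, 1) l ∧
    pvNest (0, 1) (l ++ [x]) = pvNest (1, 0) l := by
  constructor <;> · simp [pvNest, List.foldr_append]

-- fusion: B's outer loop from index i equals A's scan over the uniform-recurrence
-- convergents of the remaining quotients, given the basis-run/state correspondence.
theorem pvLoopB_eq_scan (e n : Int) (qs : List Int) :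
    ∀ (i : Nat) (h2 h1 k2 k1 : Int),
      pvNest (1, 0) (qs.take i) = (h1, k1) →
      pvNest (0, 1) (qs.take i) = (h2, k2) →
      pvLoopB e n qs i = pvScanA e n (pvConvU (qs.drop i) h2 h1 k2 k1) := by
  intro i
  induction hi : qs.length - i using Nat.strong_induction_on generalizing i with
  | _ m ih =>
    intro h2 h1 k2 k1 hA hB
    subst hi
    by_cases h : i < qs.length
    · have hdrop : qs.drop i = qs[i] :: qs.drop (i + 1) :=
        List.drop_eq_getElem_cons h
      have hcand : pvNest (qs[i], 1) (qs.take i)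
          = (qs[i] * h1 + h2, qs[i] * k1 + k2) := by
        rw [pvNest_linear, hA, hB]; ring_nf
      have htake : qs.take (i + 1) = qs.take i ++ [qs[i]] := by
        rw [List.take_add_one]
        simp [List.getElem?_eq_getElem h]
      have hA' : pvNest (1, 0) (qs.take (i + 1)) = (qs[i] * h1 + h2, qs[i] * k1 + k2) := by
        rw [htake, (pvNest_append _ _).1, pvNest_linear, hA, hB]; ring_nf
      have hB' : pvNest (0, 1) (qs.take (i + 1)) = (h1, k1) := by
        rw [htake, (pvNest_append _ _).2, hA]
      have hrec := ih (qs.length - (i + 1)) (by omega) (i + 1) rfl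
        h1 (qs[i] * h1 + h2) k1 (qs[i] * k1 + k2) hA' hB'
      rw [pvLoopB, hdrop]
      simp only [h, dite_true, pvConvU, pvScanA, hcand, hrec]
    · have : qs.drop i = [] := List.drop_eq_nil_of_le (by omega)
      rw [pvLoopB, this]
      simp [h, pvConvU, pvScanA]

theorem wiener_attack_spec : Claim_equal_wiener_attack := by
  intro e n _
  unfold Spec_wiener_attack wiener_attack wiener_attack_alt
  rw [pvQsB_eq_cfA, pvConvergentsA_eq_convU,
      pvLoopB_eq_scan e n (pvCfA e n) 0 0 1 1 0 (by simp [pvNest]) (by simp [pvNest])]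
  rfl
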